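-- pv_equiv track=rewrite | github.com/benquick123/code-profiling | code/batch-2/vse-naloge-brez-testov/DN5-M-240.py | vsi_avtorji
-- ===== SOURCE A (Python) =====
-- def unikati(s):
--     tab = []
--     i = 0
--     j = 0
--     while i < len(s):
--         j = 0
--         vsebuje = False
--         while j < len(tab):
--             if s[i] == tab[j]:
--                 vsebuje = True
--             j = j + 1
--         if vsebuje == False:
--             tab.append(s[i])
--         i = i + 1
--
--     return tab
--
-- def avtor(tvit):
--     znaki = list(tvit)
--     i = 0
--     while i < len(znaki):
--         if znaki[i] == ":":
--             break
--         i = i + 1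
--
--     tab = []
--     j = 0
--     while j < i:
--         tab.append(znaki[j])
--         j = j + 1
--
--     avtor = "".join(tab)
--
--     return avtor
--
-- def vsi_avtorji(tviti):
--     avtorji = []
--     i = 0
--     while i < len(tviti):
--         x = avtor(tviti[i])
--         avtorji.append(x)
--         i = i + 1
--
--     avtorji = unikati(avtorji)
--
--     return avtorji
-- ===== SOURCE B (Python) =====
-- def vsi_avtorji(tviti):
--     out = []
--     seen = set()
--     for t in tviti:
--         i = t.find(':')
--         a = t if i < 0 else t[:i]
--         if a not in seen:
--             seen.add(a)
--             out.append(a)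
--     return out
-- ===== Notes on version B (the rewrite author's own statement) =====
-- stated objective: faster
-- what changed: Replaces A's three index-driven while-loop helpers (char-scan author extraction, rebuild-by-append, then a quadratic nested-loop dedup over the full author list) with one fused pass that extracts each author via find/slice and dedupes on the fly with a seen set.
import Mathlib
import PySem

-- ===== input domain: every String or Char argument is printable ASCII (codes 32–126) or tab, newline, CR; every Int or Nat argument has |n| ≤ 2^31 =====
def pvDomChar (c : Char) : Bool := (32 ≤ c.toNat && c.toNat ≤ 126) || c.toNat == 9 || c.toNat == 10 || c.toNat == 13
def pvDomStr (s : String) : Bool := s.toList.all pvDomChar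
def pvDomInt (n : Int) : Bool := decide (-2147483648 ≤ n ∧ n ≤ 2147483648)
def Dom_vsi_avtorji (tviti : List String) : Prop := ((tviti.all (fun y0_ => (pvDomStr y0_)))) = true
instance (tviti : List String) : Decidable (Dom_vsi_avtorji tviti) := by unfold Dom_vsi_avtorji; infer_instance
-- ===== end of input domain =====

-- B fuses A's three while-loop helpers into one pass (find/slice author, O(1)-membership seen-set dedup instead of the quadratic nested rescan); objective: faster.

-- ===== PORT A =====

-- first while loop of `avtor`: scan for the first ':' starting at index i
def pvFindColon (znaki : List Char) (i : Nat) : Nat :=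
  if h : i < znaki.length then
    if znaki[i] = ':' then i else pvFindColon znaki (i + 1)
  else i
termination_by znaki.length - i

-- second while loop of `avtor`: tab.append(znaki[j]) for j = 0 .. i-1
def pvCopyPrefix (znaki : List Char) (i j : Nat) (tab : List Char) : List Char :=
  if j < i then pvCopyPrefix znaki i (j + 1) (tab ++ [znaki.getD j default]) else tab
termination_by i - j

def pvAvtor (tvit : String) : String :=
  let znaki := tvit.toList
  let i := pvFindColon znaki 0
  String.ofList (pvCopyPrefix znaki i 0 [])

-- `unikati`: outer while loop over s; inner while loop sets `vsebuje` by scanning tab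
def pvUnikati (s : List String) : List String :=
  s.foldl (fun tab x =>
    if (tab.foldl (fun vsebuje y => if x = y then true else vsebuje) false) = false
    then tab ++ [x] else tab) []

def vsi_avtorji (tviti : List String) : List String :=
  pvUnikati (tviti.foldl (fun avtorji t => avtorji ++ [pvAvtor t]) [])

-- ===== PORT B =====

-- i = t.find(':'); a = t if i < 0 else t[:i]
def pvAuthorB (t : String) : String :=
  let i := PySem.Str.find t ":"
  if i < 0 then t else PySem.Str.slice t none (some i)

def vsi_avtorji_alt (tviti : List String) : List String :=
  (tviti.foldl (fun st t =>
      let a := pvAuthorB t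
      if PySem.Set.contains st.2 a then st
      else (st.1 ++ [a], PySem.Set.add st.2 a))
    ([], PySem.Set.empty)).1

-- ===== PRECONDITION & SPEC =====
def Spec_vsi_avtorji (tviti : List String) (out : List String) : Prop := out = vsi_avtorji_alt tviti
instance (tviti : List String) (out : List String) : Decidable (Spec_vsi_avtorji tviti out) := by unfold Spec_vsi_avtorji; infer_instance

-- ===== CLAIM (what is proved, stated in full; the proofs are below) =====
def Claim_equal_vsi_avtorji : Prop := ∀ (tviti : List String), Dom_vsi_avtorji tviti → Spec_vsi_avtorji tviti (vsi_avtorji tviti)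

-- ===== LEMMAS AND PROOFS =====

-- A's inner membership scan is List.contains
theorem pv_fold_contains_aux (tab : List String) (x : String) (b : Bool) :
    (tab.foldl (fun vsebuje y => if x = y then true else vsebuje) b) = (b || tab.contains x) := by
  induction tab generalizing b with
  | nil => simp
  | cons y rest ih =>
    simp only [List.foldl_cons, List.contains_cons, ih]
    by_cases h : x = y
    · simp [h]
    · have hb : (x == y) = false := beq_eq_false_iff_ne.mpr h
      simp [h, hb]

theorem pv_fold_contains (tab : List String) (x : String) :
    (tab.foldl (fun vsebuje y => if x = y then true else vsebuje) false) = tab.contains x := by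
  rw [pv_fold_contains_aux]
  simp

-- A's unikati is ordered dedup (= PySem.Set.ofList)
theorem pv_unikati_eq (s : List String) : pvUnikati s = PySem.Set.ofList s := by
  unfold pvUnikati
  rw [PySem.Set.ofList_eq_foldl]
  congr 1
  funext tab x
  rw [pv_fold_contains]
  simp [PySem.Set.add, PySem.Set.contains]

-- findColon scans to the first ':'
theorem pv_findColon_eq (znaki : List Char) (i : Nat) :
    pvFindColon znaki i = i + ((znaki.drop i).takeWhile (· ≠ ':')).length := by
  rw [pvFindColon]
  split
  · rename_i h
    rw [List.drop_eq_getElem_cons h]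
    split
    · rename_i hc
      simp [hc]
    · rename_i hc
      rw [pv_findColon_eq znaki (i + 1)]
      simp only [List.takeWhile_cons, ne_eq, hc, not_false_iff, decide_true, if_true,
        List.length_cons]
      omega
  · rename_i h
    rw [List.drop_eq_nil_of_le (by omega)]
    simp
termination_by znaki.length - i

-- the copy loop rebuilds the prefix
theorem pv_copyPrefix_eq (znaki : List Char) (i j : Nat) (tab : List Char)
    (hi : i ≤ znaki.length) :
    pvCopyPrefix znaki i j tab = tab ++ ((znaki.take i).drop j) := by
  rw [pvCopyPrefix]
  split
  · rename_i h
    rw [pv_copyPrefix_eq znaki i (j + 1) _ hi]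
    have hjl : j < (znaki.take i).length := by simp; omega
    rw [List.drop_eq_getElem_cons hjl]
    have : (znaki.take i)[j] = znaki[j]'(by omega) := List.getElem_take
    rw [List.append_assoc]
    congr 1
    rw [this]
    simp [List.getElem?_eq_getElem (show j < znaki.length by omega)]
  · rename_i h
    rw [List.drop_eq_nil_of_le (by simp; omega)]
    simp
termination_by i - j

-- [a] <+: l means l starts with a
theorem pv_singleton_prefix (a : Char) (l : List Char) : [a] <+: l ↔ l.head? = some a := by
  cases l with
  | nil => simp
  | cons b t => simp [List.cons_prefix_cons, eq_comm]

-- take k is the colon-free takeWhile when position k holds the first ':'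
theorem pv_takeWhile_eq_take (cs : List Char) (k : Nat)
    (hpre : ∀ j, j < k → cs[j]? ≠ some ':') (hk : cs[k]? = some ':') :
    cs.takeWhile (· ≠ ':') = cs.take k := by
  induction cs generalizing k with
  | nil => simp at hk
  | cons c rest ih =>
    cases k with
    | zero =>
      simp only [List.getElem?_cons_zero, Option.some.injEq] at hk
      simp [hk]
    | succ k =>
      have hc : c ≠ ':' := by
        have := hpre 0 (Nat.succ_pos k)
        simpa using this
      simp only [List.takeWhile_cons, ne_eq, hc, not_false_iff, decide_true, if_true,
        List.take_succ_cons]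
      congr 1
      exact ih k (fun j hj => by simpa using hpre (j + 1) (by omega)) (by simpa using hk)

theorem pv_avtor_eq (t : String) : pvAvtor t = pvAuthorB t := by
  unfold pvAvtor pvAuthorB
  simp only []
  set cs := t.toList with hcs
  have hlen : ((cs.takeWhile (· ≠ ':')).length) ≤ cs.length := (List.takeWhile_prefix _).length_le
  have hA : pvCopyPrefix cs (pvFindColon cs 0) 0 [] = cs.takeWhile (· ≠ ':') := by
    rw [pv_findColon_eq cs 0]
    simp only [List.drop_zero, Nat.zero_add]
    rw [pv_copyPrefix_eq cs _ 0 [] hlen]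
    simp only [List.drop_zero, List.nil_append]
    exact ((List.prefix_iff_eq_take.mp (List.takeWhile_prefix _)).symm)
  rw [hA]
  by_cases hmem : ':' ∈ cs
  · have hinf : (":".toList) <:+: cs := by
      simpa using (List.singleton_infix_iff ':' cs).mpr hmem
    have hpos : 0 ≤ PySem.Str.find t ":" := by
      rw [PySem.Str.find_nonneg_iff]
      exact hinf
    rw [if_neg (by omega)]
    -- B's slice is take (find).toNat
    have hfind : PySem.Str.find t ":" = PySem.Chars.find cs [':'] := by
      simp [hcs]
    have hpos' : 0 ≤ PySem.Chars.find cs [':'] := by rw [← hfind]; exact hpos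
    obtain ⟨hat, hmin⟩ := PySem.Chars.find_spec (s := cs) (sub := [':']) hpos'
    have hTW : cs.takeWhile (· ≠ ':') = cs.take (PySem.Chars.find cs [':']).toNat := by
      apply pv_takeWhile_eq_take
      · intro j hj hj'
        exact hmin j hj ((pv_singleton_prefix ':' _).mpr (by rw [List.head?_drop]; exact hj'))
      · rw [← List.head?_drop]
        exact (pv_singleton_prefix ':' _).mp hat
    have hslice : (PySem.Str.slice t none (some (PySem.Str.find t ":"))).toList
        = cs.take (PySem.Chars.find cs [':']).toNat := by
      simp only [PySem.Str.toList_slice, PySem.Chars.slice_eq_listSlice, ← hcs]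
      rw [hfind, PySem.List.slice_to _ hpos']
    rw [hTW, ← hslice, String.ofList_toList]
  · have hninf : ¬ (":".toList) <:+: cs := by
      simpa using fun h => hmem ((List.singleton_infix_iff ':' cs).mp h)
    have hneg : PySem.Str.find t ":" = -1 := by
      rw [PySem.Str.find_eq_neg_one_iff]
      exact hninf
    rw [if_pos (by rw [hneg]; norm_num)]
    have : cs.takeWhile (· ≠ ':') = cs :=
      List.takeWhile_eq_self_iff.mpr (fun x hx => by
        simp only [ne_eq, decide_eq_true_eq]
        exact fun hcol => hmem (hcol ▸ hx))
    rw [this, hcs, String.ofList_toList]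

-- B's fold keeps out = seen
theorem pv_alt_aux (ts : List String) (acc : List String) :
    (ts.foldl (fun st t =>
      let a := pvAuthorB t
      if PySem.Set.contains st.2 a then st
      else (st.1 ++ [a], PySem.Set.add st.2 a)) (acc, acc)).1
    = PySem.Set.update acc (ts.map pvAuthorB) := by
  induction ts generalizing acc with
  | nil => simp [PySem.Set.update]
  | cons t rest ih =>
    rw [List.map_cons, PySem.Set.update]
    simp only [List.foldl_cons]
    by_cases h : pvAuthorB t ∈ acc
    · have hc : PySem.Set.contains acc (pvAuthorB t) = true := by
        simp [PySem.Set.contains, h]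
      have hadd : PySem.Set.add acc (pvAuthorB t) = acc := by
        unfold PySem.Set.add; rw [if_pos hc]
      rw [hadd]
      have hrec := ih acc
      rw [PySem.Set.update] at hrec
      simpa [h] using hrec
    · have hc : ¬ PySem.Set.contains acc (pvAuthorB t) = true := by
        simp [PySem.Set.contains, h]
      have hadd : PySem.Set.add acc (pvAuthorB t) = acc ++ [pvAuthorB t] := by
        unfold PySem.Set.add; rw [if_neg hc]
      rw [hadd]
      have hrec := ih (acc ++ [pvAuthorB t])
      rw [PySem.Set.update] at hrec
      rw [← hadd] at hrec ⊢
      simpa [h] using hrec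

theorem pv_alt_eq (tviti : List String) :
    vsi_avtorji_alt tviti = PySem.Set.ofList (tviti.map pvAuthorB) := by
  unfold vsi_avtorji_alt
  have h := pv_alt_aux tviti []
  simp only [PySem.Set.empty] at *
  rw [h]
  rw [PySem.Set.ofList_eq_foldl]
  rfl

-- ===== VERDICT (by name: the statement is the Claim_ definition above) =====
theorem vsi_avtorji_spec : Claim_equal_vsi_avtorji := by
  intro tviti _
  unfold Spec_vsi_avtorji
  rw [pv_alt_eq]
  unfold vsi_avtorji
  rw [PySem.List.foldl_append_singleton_eq_map, pv_unikati_eq]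
  simp [List.map_congr_left fun t _ => pv_avtor_eq t]
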